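-- pv_equiv track=rewrite | github.com/pypi-data/pypi-mirror-384 | packages/brs-xss/brs_xss-2.0.1.tar.gz/brs_xss-2.0.1/brsxss/waf/obfuscation_engine.py | unicode_obfuscation
-- ===== SOURCE A (Python) =====
-- def unicode_obfuscation(js_code: str) -> str:
--     """Unicode obfuscation"""
--     # alert -> ale\u0072t
--     result = ""
--     for i, char in enumerate(js_code):
--         if i % 3 == 0 and char.isalpha():
--             result += f'\\u{ord(char):04x}'
--         else:
--             result += char
--     return result
-- ===== SOURCE B (Python) =====
-- def unicode_obfuscation(js_code: str) -> str:
--     """Unicode obfuscation"""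
--     def piece(i):
--         head = js_code[i]
--         tail = js_code[i + 1:i + 3]
--         esc = f'\\u{ord(head):04x}' if head.isalpha() else head
--         return esc + tail
--     return ''.join(piece(i) for i in range(0, len(js_code), 3))
-- ===== Notes on version B (the rewrite author's own statement) =====
-- stated objective: alternative
-- what changed: Replaces the per-character enumerate loop with an i%3 test by a stride-3 traversal (range(0, len, 3)) that escapes only the leading character of each 3-char block and copies the block's tail via a slice, joining the pieces at the end.
import Mathlib
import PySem

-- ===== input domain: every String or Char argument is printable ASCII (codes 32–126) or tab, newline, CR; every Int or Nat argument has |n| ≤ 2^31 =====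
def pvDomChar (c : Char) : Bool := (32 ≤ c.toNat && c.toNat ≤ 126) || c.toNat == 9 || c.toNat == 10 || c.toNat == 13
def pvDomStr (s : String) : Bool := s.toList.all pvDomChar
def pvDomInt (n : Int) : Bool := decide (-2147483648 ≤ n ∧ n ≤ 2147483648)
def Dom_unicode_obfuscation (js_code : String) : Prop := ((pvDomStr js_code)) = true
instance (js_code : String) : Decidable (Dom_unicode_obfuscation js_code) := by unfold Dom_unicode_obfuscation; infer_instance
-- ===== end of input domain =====

-- B replaces A's per-character enumerate/i%3 loop by a stride-3 traversal that escapes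
-- only the leading character of each 3-char block (objective: alternative decomposition).


-- ===== PORT A =====
-- f'\u{ord(c):04x}': exact for code points below 0x10000 (all inputs here are ASCII)
def pvHexDigit (n : Nat) : Char := if n < 10 then Char.ofNat (48 + n) else Char.ofNat (87 + n)

def pvEsc (c : Char) : List Char :=
  ['\\', 'u', pvHexDigit (c.toNat / 4096 % 16), pvHexDigit (c.toNat / 256 % 16),
   pvHexDigit (c.toNat / 16 % 16), pvHexDigit (c.toNat % 16)]

def unicode_obfuscation (js_code : String) : String :=
  String.ofList ((PySem.List.enumerate js_code.toList 0).foldl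
    (fun acc p =>
      if PySem.Int.mod p.1 3 == 0 && PySem.Chars.isalpha p.2 then acc ++ pvEsc p.2
      else acc ++ [p.2]) [])

-- ===== PORT B =====
-- piece(i): the output contribution of the 3-char block starting at i
def pvPiece (xs : List Char) (i : Int) : List Char :=
  let head := PySem.List.pyGetD xs i ' '
  let tail := PySem.List.slice xs (some (i + 1)) (some (i + 3))
  (if PySem.Chars.isalpha head then pvEsc head else [head]) ++ tail

def unicode_obfuscation_alt (js_code : String) : String :=
  String.ofList (List.flatMap (pvPiece js_code.toList) (PySem.List.pyRange 0 (PySem.Str.len js_code) 3))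

-- ===== PRECONDITION & SPEC =====
def Spec_unicode_obfuscation (js_code : String) (out : String) : Prop := out = unicode_obfuscation_alt js_code
instance (js_code : String) (out : String) : Decidable (Spec_unicode_obfuscation js_code out) := by unfold Spec_unicode_obfuscation; infer_instance

-- ===== CLAIM (what is proved, stated in full; the proofs are below) =====
def Claim_equal_unicode_obfuscation : Prop := ∀ (js_code : String), Dom_unicode_obfuscation js_code → Spec_unicode_obfuscation js_code (unicode_obfuscation js_code)

-- ===== LEMMAS AND PROOFS =====

-- the contribution of one character position in A
def pvGA (p : Int × Char) : List Char :=
  if PySem.Int.mod p.1 3 == 0 && PySem.Chars.isalpha p.2 then pvEsc p.2 else [p.2]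

-- the common normal form: process the string three characters at a time
def pvChunk : List Char → List Char
  | [] => []
  | c :: rest =>
      (if PySem.Chars.isalpha c then pvEsc c else [c]) ++ rest.take 2 ++ pvChunk (rest.drop 2)
termination_by xs => xs.length
decreasing_by simp

theorem pvChunk_nil : pvChunk [] = [] := by rw [pvChunk]

theorem pvChunk_cons (c : Char) (rest : List Char) :
    pvChunk (c :: rest) =
      (if PySem.Chars.isalpha c then pvEsc c else [c]) ++ rest.take 2 ++ pvChunk (rest.drop 2) := by
  rw [pvChunk]

theorem pvA_flatMap (cs : List Char) (s : Int) (h : PySem.Int.mod s 3 = 0) :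
    List.flatMap pvGA (PySem.List.enumerate cs s) = pvChunk cs := by
  have hm : ∀ t : Int, PySem.Int.mod t 3 = t % 3 := fun t => PySem.Int.mod_eq_emod_of_pos (by norm_num)
  rw [hm] at h
  match cs with
  | [] => simp [pvChunk_nil, PySem.List.enumerate]
  | [c] =>
    simp [pvChunk_cons, pvChunk_nil, PySem.List.enumerate, pvGA, h]
  | [c, d] =>
    have h1 : ¬((s + 1) % 3 = 0) := by omega
    simp [pvChunk_cons, pvChunk_nil, PySem.List.enumerate, pvGA, h, h1]
  | c :: d :: e :: rest =>
    have h1 : ¬((s + 1) % 3 = 0) := by omega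
    have h2 : ¬((s + 1 + 1) % 3 = 0) := by omega
    have h3 : PySem.Int.mod (s + 1 + 1 + 1) 3 = 0 := by rw [hm]; omega
    have ih := pvA_flatMap rest (s + 1 + 1 + 1) h3
    simp only [PySem.List.enumerate_cons, List.flatMap_cons, ih]
    simp [pvChunk_cons, pvGA, h, h1, h2]
termination_by cs.length

theorem pvRange3_cons (n : Int) (h : 0 < n) :
    PySem.List.pyRange 0 n 3 = 0 :: PySem.List.pyRange 3 n 3 := by
  rw [PySem.List.pyRange_of_pos _ _ (by norm_num), PySem.List.pyRange_of_pos _ _ (by norm_num)]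
  by_cases hn : (3:Int) < n
  · have hc : ((n - 0 + 3 - 1) / 3).toNat = ((n - 3 + 3 - 1) / 3).toNat + 1 := by omega
    simp only [h, hn, if_pos, hc, List.range_succ_eq_map, List.map_cons, List.map_map]
    refine List.cons_eq_cons.mpr ⟨by norm_num, ?_⟩
    apply List.map_congr_left; intro k _; simp [Nat.succ_eq_add_one]; omega
  · have hc : ((n - 0 + 3 - 1) / 3).toNat = 1 := by omega
    simp only [h, hn, if_pos, hc]
    simp

theorem pvRange3_shift (n : Int) :
    PySem.List.pyRange 3 n 3 = (PySem.List.pyRange 0 (n - 3) 3).map (· + 3) := by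
  rw [PySem.List.pyRange_of_pos _ _ (by norm_num), PySem.List.pyRange_of_pos _ _ (by norm_num)]
  by_cases hn : (3:Int) < n
  · have he : (0:Int) < n - 3 := by omega
    have hc : ((n - 3 + 3 - 1) / 3).toNat = ((n - 3 - 0 + 3 - 1) / 3).toNat := by omega
    simp only [hn, he, if_pos, hc, List.map_map]
    apply List.map_congr_left; intro k _; simp; omega
  · have he : ¬((0:Int) < n - 3) := by omega
    simp [hn]

theorem pvPiece_shift (xs : List Char) (i : Int) (hi : 0 ≤ i) :
    pvPiece xs (i + 3) = pvPiece (xs.drop 3) i := by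
  unfold pvPiece
  have hhead : PySem.List.pyGetD xs (i + 3) ' ' = PySem.List.pyGetD (xs.drop 3) i ' ' := by
    rw [PySem.List.pyGetD_of_nonneg xs ' ' (show (0:Int) ≤ i + 3 by omega),
      PySem.List.pyGetD_of_nonneg (xs.drop 3) ' ' hi]
    rw [List.getD_eq_getElem?_getD, List.getD_eq_getElem?_getD, List.getElem?_drop]
    congr 2; omega
  have htail : PySem.List.slice xs (some (i + 3 + 1)) (some (i + 3 + 3))
      = PySem.List.slice (xs.drop 3) (some (i + 1)) (some (i + 3)) := by
    rw [PySem.List.slice_toNat _ (by omega) (by omega), PySem.List.slice_toNat _ (by omega) (by omega)]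
    rw [List.drop_drop]
    have h1 : (i + 3 + 3).toNat - (i + 3 + 1).toNat = 2 := by omega
    have h2 : (i + 3).toNat - (i + 1).toNat = 2 := by omega
    have h3 : (i + 3 + 1).toNat = 3 + (i + 1).toNat := by omega
    rw [h1, h2, h3]
  rw [hhead, htail]

theorem pvB_flatMap (xs : List Char) :
    List.flatMap (pvPiece xs) (PySem.List.pyRange 0 (xs.length : Int) 3) = pvChunk xs := by
  match xs with
  | [] =>
    rw [PySem.List.pyRange_of_pos _ _ (by norm_num)]
    simp [pvChunk_nil]
  | c :: rest =>
    have hn : (0:Int) < ((c :: rest).length : Int) := by simp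
    rw [pvRange3_cons _ hn, List.flatMap_cons, pvRange3_shift, List.flatMap_map]
    have hhead : pvPiece (c :: rest) 0 =
        (if PySem.Chars.isalpha c then pvEsc c else [c]) ++ rest.take 2 := by
      unfold pvPiece
      rw [PySem.List.pyGetD_of_nonneg _ _ (by omega), PySem.List.slice_toNat _ (by omega) (by omega)]
      norm_num
      rfl
    have hcong : ∀ i ∈ PySem.List.pyRange 0 (((c :: rest).length : Int) - 3) 3,
        pvPiece (c :: rest) (i + 3) = pvPiece ((c :: rest).drop 3) i := by
      intro i hi
      have := (PySem.List.mem_pyRange_iff_of_pos (by norm_num) i).mp hi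
      exact pvPiece_shift _ _ this.1
    rw [List.flatMap_congr hcong]
    have hlen : PySem.List.pyRange 0 (((c :: rest).length : Int) - 3) 3
        = PySem.List.pyRange 0 ((((c :: rest).drop 3).length : Int)) 3 := by
      have hr : (c :: rest).length = rest.length + 1 := by simp
      have hd : ((c :: rest).drop 3).length = rest.length - 2 := by simp
      by_cases h3 : 3 ≤ (c :: rest).length
      · congr 1; omega
      · rw [PySem.List.pyRange_of_pos _ _ (by norm_num), PySem.List.pyRange_of_pos _ _ (by norm_num)]
        have ha : ¬((0:Int) < ((c :: rest).length : Int) - 3) := by omega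
        have hb : ¬((0:Int) < ((((c :: rest).drop 3).length : Int))) := by omega
        rw [if_neg ha, if_neg hb]
    rw [hlen]
    have ih := pvB_flatMap ((c :: rest).drop 3)
    rw [ih]
    show pvPiece (c :: rest) 0 ++ pvChunk (rest.drop 2) = pvChunk (c :: rest)
    rw [hhead]
    simp [pvChunk_cons]
termination_by xs.length
decreasing_by simp

-- ===== VERDICT (by name: the statement is the Claim_ definition above) =====
theorem unicode_obfuscation_spec : Claim_equal_unicode_obfuscation := by
  intro js_code _
  unfold Spec_unicode_obfuscation unicode_obfuscation unicode_obfuscation_alt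
  have hstep : (fun (acc : List Char) (p : Int × Char) =>
      if PySem.Int.mod p.1 3 == 0 && PySem.Chars.isalpha p.2 then acc ++ pvEsc p.2
      else acc ++ [p.2]) = fun acc p => acc ++ pvGA p := by
    funext acc p
    unfold pvGA
    rw [apply_ite (fun l : List Char => acc ++ l)]
  rw [hstep, PySem.List.foldl_append_eq_flatMap, List.nil_append,
    pvA_flatMap _ 0 (by decide), PySem.Str.len_eq, pvB_flatMap]
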